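-- pv_equiv track=rewrite | github.com/Duke-Python/CPS101-APTs | InterestingParty.py | bestInvitation
-- ===== SOURCE A (Python) =====
-- def bestInvitation(first, second):
--     """
--     return int based on string list
--     parameters first and second
--     """
--     topics = dict()
--     for topic1, topic2 in zip(first, second):
--         if topic1 not in topics:
--             topics[topic1] = 0
--         if topic2 not in topics:
--             topics[topic2] = 0
--         topics[topic1] += 1
--         topics[topic2] += 1
--
--     topic_list = list()
--     for topic, count in topics.items():
--         topic_list.append((topic, count))
--
--     topic_list.sort(key=lambda x: x[1], reverse=True)
--
--     return topic_list[0][1]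
-- ===== SOURCE B (Python) =====
-- def bestInvitation(first, second):
--     combined = sorted(t for pair in zip(first, second) for t in pair)
--     best = 0
--     run = 0
--     prev = None
--     for t in combined:
--         if prev == t:
--             run += 1
--         else:
--             run = 1
--             prev = t
--         if run > best:
--             best = run
--     return best
-- ===== Notes on version B (the rewrite author's own statement) =====
-- stated objective: alternative
-- what changed: Replaces A's dict-of-counts plus sort-by-count with sorting the flattened pair list and scanning it once for the longest run of equal adjacent elements, which is the maximal multiplicity.
import Mathlib
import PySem

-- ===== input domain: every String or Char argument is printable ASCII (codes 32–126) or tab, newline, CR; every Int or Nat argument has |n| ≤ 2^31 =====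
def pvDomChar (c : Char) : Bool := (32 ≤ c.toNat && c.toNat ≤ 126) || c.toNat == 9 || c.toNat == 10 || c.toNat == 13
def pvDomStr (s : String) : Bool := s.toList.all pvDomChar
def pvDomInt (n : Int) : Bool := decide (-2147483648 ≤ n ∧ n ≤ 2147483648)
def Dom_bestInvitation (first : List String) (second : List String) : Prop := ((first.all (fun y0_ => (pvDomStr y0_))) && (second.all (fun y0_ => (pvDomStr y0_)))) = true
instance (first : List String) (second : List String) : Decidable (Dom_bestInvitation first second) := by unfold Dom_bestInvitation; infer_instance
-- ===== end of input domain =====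

-- B sorts the flattened pair list and scans once for the longest run of equal adjacent
-- elements (the maximal multiplicity), instead of A's count dict sorted by count.

-- ===== PORT A =====
def bestInvitation (first : List String) (second : List String) : Int :=
  let topics := (first.zip second).foldl (fun d p =>
    let d := if d.contains p.1 then d else d.insert p.1 (0 : Int)
    let d := if d.contains p.2 then d else d.insert p.2 (0 : Int)
    let d := d.modify p.1 0 (· + 1)
    d.modify p.2 0 (· + 1)) PySem.Dict.empty
  let topic_list := topics.items.foldl (fun acc p => acc ++ [(p.1, p.2)]) []
  (PySem.List.pyGetD (PySem.List.sorted topic_list (fun x => x.2) true) 0 ("", 0)).2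

-- ===== PORT B =====
-- loop body of B's scan (best, run, prev are the loop state)
def bStep (st : Int × Int × Option String) (t : String) : Int × Int × Option String :=
  let best := st.1
  let run := st.2.1
  let prev := st.2.2
  let (run, prev) := if prev == some t then (run + 1, prev) else ((1 : Int), some t)
  let best := if run > best then run else best
  (best, run, prev)

def bestInvitation_alt (first : List String) (second : List String) : Int :=
  let combined := PySem.List.sorted ((first.zip second).flatMap (fun p => [p.1, p.2])) (fun x => x) false
  (combined.foldl bStep (0, 0, none)).1

-- ===== PRECONDITION & SPEC =====
-- Pre_ excludes exactly the inputs where either list is empty: there zip is empty and A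
-- raises IndexError on topic_list[0].
def Pre_bestInvitation (first : List String) (second : List String) : Prop :=
  first ≠ [] ∧ second ≠ []
instance (first : List String) (second : List String) : Decidable (Pre_bestInvitation first second) := by unfold Pre_bestInvitation; infer_instance
def pvWitness_bestInvitation : List String × List String := (["a"], ["b"])

def Spec_bestInvitation (first : List String) (second : List String) (out : Int) : Prop := out = bestInvitation_alt first second
instance (first : List String) (second : List String) (out : Int) : Decidable (Spec_bestInvitation first second out) := by unfold Spec_bestInvitation; infer_instance

-- ===== CLAIM (what is proved, stated in full; the proofs are below) =====
def Claim_equal_bestInvitation : Prop := ∀ (first : List String) (second : List String), Dom_bestInvitation first second → Pre_bestInvitation first second → Spec_bestInvitation first second (bestInvitation first second)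
-- ===== LEMMAS AND PROOFS =====

-- ---- A-side: the setdefault/increment dict loop is a counter of the flattened list ----

theorem pv_if_eq_setdefault (d : PySem.Dict String Int) (k : String) :
    (if d.contains k = true then d else d.insert k (0 : Int)) = d.setdefault k 0 := by
  by_cases h : d.contains k = true
  · rw [if_pos h, PySem.Dict.setdefault_of_contains d 0 h]
  · have h' : d.contains k = false := by simpa using h
    rw [if_neg h, PySem.Dict.setdefault_of_not_contains d 0 h']

theorem pv_sd_mod (d : PySem.Dict String Int) (k : String) (f : Int → Int) :
    (d.setdefault k (0 : Int)).modify k 0 f = d.modify k 0 f := by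
  by_cases h : d.contains k = true
  · rw [PySem.Dict.setdefault_of_contains d 0 h]
  · have h' : d.contains k = false := by simpa using h
    show (d.setdefault k 0).insert k (f ((d.setdefault k 0).getD k 0)) = d.insert k (f (d.getD k 0))
    rw [PySem.Dict.getD_setdefault_self, PySem.Dict.setdefault_of_not_contains d 0 h',
      PySem.Dict.insert_insert_self]

theorem pv_comm (d : PySem.Dict String Int) (k1 k2 : String) (f : Int → Int)
    (hne : k1 ≠ k2) (h1 : d.contains k1 = true) :
    (d.setdefault k2 (0 : Int)).modify k1 0 f = (d.modify k1 0 f).setdefault k2 0 := by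
  by_cases h2 : d.contains k2 = true
  · rw [PySem.Dict.setdefault_of_contains d 0 h2,
      PySem.Dict.setdefault_of_contains _ 0 (by rw [PySem.Dict.contains_modify]; simp [h2])]
  · have h2' : d.contains k2 = false := by simpa using h2
    show (d.setdefault k2 0).insert k1 (f ((d.setdefault k2 0).getD k1 0))
      = (d.insert k1 (f (d.getD k1 0))).setdefault k2 0
    have hg : (d.setdefault k2 (0 : Int)).getD k1 0 = d.getD k1 0 := by
      rw [PySem.Dict.getD_eq_get?_getD, PySem.Dict.get?_setdefault_of_ne _ _ hne,
        ← PySem.Dict.getD_eq_get?_getD]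
    rw [hg, PySem.Dict.setdefault_of_not_contains d 0 h2']
    set w := f (d.getD k1 0) with hw
    have hc1 : (d.insert k2 (0 : Int)).contains k1 = true := by
      rw [PySem.Dict.contains_insert]; simp [h1]
    have hc2 : (d.insert k1 w).contains k2 = false := by
      rw [PySem.Dict.contains_insert]; simp [h2', hne.symm]
    rw [PySem.Dict.setdefault_of_not_contains _ 0 hc2]
    apply PySem.Dict.ext
    rw [PySem.Dict.items_insert_of_contains _ w hc1,
      PySem.Dict.items_insert_of_not_contains d (0 : Int) h2',
      PySem.Dict.items_insert_of_not_contains _ (0 : Int) hc2,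
      PySem.Dict.items_insert_of_contains _ w h1]
    rw [List.map_append]
    congr 1
    simp [hne.symm]

theorem pv_step_full (d : PySem.Dict String Int) (p : String × String) :
    ((if (if d.contains p.1 = true then d else d.insert p.1 (0 : Int)).contains p.2 = true then
          (if d.contains p.1 = true then d else d.insert p.1 (0 : Int))
        else (if d.contains p.1 = true then d else d.insert p.1 (0 : Int)).insert p.2 (0 : Int)).modify
        p.1 0 (· + 1)).modify p.2 0 (· + 1)
      = ((d.modify p.1 0 (· + 1)).modify p.2 0 (· + 1)) := by
  obtain ⟨k1, k2⟩ := p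
  simp only [pv_if_eq_setdefault]
  by_cases he : k1 = k2
  · subst he
    rw [PySem.Dict.setdefault_of_contains _ 0 (by rw [PySem.Dict.contains_setdefault]; simp),
      pv_sd_mod]
  · have h1 : (d.setdefault k1 (0 : Int)).contains k1 = true := by
      rw [PySem.Dict.contains_setdefault]; simp
    rw [pv_comm _ _ _ _ he h1, pv_sd_mod, pv_sd_mod]

theorem pv_dict_eq (l : List (String × String)) (d : PySem.Dict String Int) :
    l.foldl (fun d p =>
      let d := if d.contains p.1 then d else d.insert p.1 (0 : Int)
      let d := if d.contains p.2 then d else d.insert p.2 (0 : Int)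
      let d := d.modify p.1 0 (· + 1)
      d.modify p.2 0 (· + 1)) d
    = (l.flatMap (fun p => [p.1, p.2])).foldl (fun d x => d.modify x 0 (· + 1)) d := by
  induction l generalizing d with
  | nil => rfl
  | cons p t ih =>
    simp only [List.foldl_cons, List.flatMap_cons, List.foldl_append]
    rw [pv_step_full]
    exact ih _

-- ---- max-of-a-list helper (proof-side only) ----

def listMaxI : List Int → Int
  | [] => 0
  | a :: xs => max a (listMaxI xs)

theorem listMaxI_nonneg (xs : List Int) : 0 ≤ listMaxI xs := by
  induction xs with
  | nil => simp [listMaxI]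
  | cons a xs ih => simp [listMaxI]; omega

theorem le_listMaxI (xs : List Int) (a : Int) (h : a ∈ xs) : a ≤ listMaxI xs := by
  induction xs with
  | nil => simp at h
  | cons b xs ih =>
    rcases List.mem_cons.mp h with h | h
    · subst h; simp [listMaxI]
    · have := ih h; simp [listMaxI]; omega

theorem listMaxI_le (xs : List Int) (c : Int) (h0 : 0 ≤ c) (h : ∀ a ∈ xs, a ≤ c) :
    listMaxI xs ≤ c := by
  induction xs with
  | nil => simpa [listMaxI]
  | cons b xs ih =>
    have hb := h b (by simp)
    have := ih (fun a ha => h a (by simp [ha]))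
    simp [listMaxI]; omega

theorem listMaxI_concat (xs : List Int) (a : Int) :
    listMaxI (xs ++ [a]) = max (listMaxI xs) a := by
  induction xs with
  | nil => simp [listMaxI]; omega
  | cons b xs ih => simp [listMaxI, ih, max_assoc]

theorem listMaxI_perm (xs ys : List Int) (h : xs.Perm ys) : listMaxI xs = listMaxI ys := by
  induction h with
  | nil => rfl
  | cons a _ ih => simp [listMaxI, ih]
  | swap a b l => simp [listMaxI]; omega
  | trans _ _ ih1 ih2 => rw [ih1, ih2]

def cnt (l : List String) (x : String) : Int := (l.count x : Int)

def maxCount (l : List String) : Int := listMaxI (l.map (cnt l))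

-- ---- B-side: the run scan on a sorted list computes the maximal multiplicity ----

theorem pv_le_getLast (l : List String) (p : String) (hs : l.Pairwise (· ≤ ·))
    (hp : l.getLast? = some p) : ∀ x ∈ l, x ≤ p := by
  induction l with
  | nil => simp at hp
  | cons a l ih =>
    rcases List.pairwise_cons.mp hs with ⟨ha, hl⟩
    cases l with
    | nil =>
      simp at hp; subst hp
      intro x hx; simp at hx; simp [hx]
    | cons b l' =>
      have hp' : (b :: l').getLast? = some p := by
        rw [List.getLast?_cons_cons] at hp; exact hp
      have hmem : p ∈ b :: l' := List.mem_of_getLast? hp'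
      intro x hx
      rcases List.mem_cons.mp hx with h | h
      · subst h; exact ha p hmem
      · exact ih hl hp' x h

theorem scan_run (l : List String) (hs : l.Pairwise (· ≤ ·)) (hne : l ≠ []) :
    ∃ p, l.getLast? = some p ∧
      l.foldl bStep (0, 0, none) = (maxCount l, cnt l p, some p) := by
  induction l using List.reverseRecOn with
  | nil => exact absurd rfl hne
  | append_singleton l t ih =>
    rcases List.pairwise_append.mp hs with ⟨hl, -, hlt⟩
    have hat : ∀ a ∈ l, a ≤ t := fun a ha => hlt a ha t (by simp)
    by_cases hlne : l = []
    · subst hlne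
      refine ⟨t, by simp, ?_⟩
      have h1 : cnt [t] t = 1 := by simp [cnt]
      have h2 : maxCount [t] = 1 := by
        simp [maxCount, cnt, listMaxI]
      simp [bStep, h1, h2]
    · obtain ⟨p, hp, hfold⟩ := ih hl hlne
      have hpm : p ∈ l := List.mem_of_getLast? hp
      have hgl : (l ++ [t]).getLast? = some t := by simp
      refine ⟨t, hgl, ?_⟩
      rw [List.foldl_append, hfold]
      set M := maxCount l with hM
      set c := cnt l p with hc
      have hMnn : 0 ≤ M := listMaxI_nonneg _
      have hcmem : cnt l p ∈ l.map (cnt l) := List.mem_map.mpr ⟨p, hpm, rfl⟩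
      have hcM : c ≤ M := le_listMaxI _ _ hcmem
      have hcnn : (0:Int) ≤ c := by simp [hc, cnt]
      -- map over the appended list
      have hmap : (l ++ [t]).map (cnt (l ++ [t])) = l.map (cnt (l ++ [t])) ++ [cnt (l ++ [t]) t] := by
        simp
      by_cases hpt : p = t
      · subst hpt
        -- the new element extends the trailing run of p
        have hstep : bStep (M, c, some p) p = (max M (c + 1), c + 1, some p) := by
          simp [bStep]; omega
        rw [List.foldl_cons, List.foldl_nil, hstep]
        have hcount : cnt (l ++ [p]) p = c + 1 := by
          simp [cnt, hc, List.count_append]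
        have hA2 : ∀ a ∈ l.map (cnt (l ++ [p])), a ≤ max M (c + 1) := by
          intro a ha
          rcases List.mem_map.mp ha with ⟨x, hx, rfl⟩
          by_cases hxp : x = p
          · subst hxp; rw [hcount]; omega
          · have h0 : [p].count x = 0 := List.count_eq_zero.mpr (by simp [hxp])
            have : cnt (l ++ [p]) x = cnt l x := by
              simp [cnt, List.count_append, h0]
            rw [this]
            have : cnt l x ≤ M := le_listMaxI _ _ (List.mem_map.mpr ⟨x, hx, rfl⟩)
            omega
        have hA : listMaxI (l.map (cnt (l ++ [p]))) ≤ max M (c + 1) :=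
          listMaxI_le _ _ (by omega) hA2
        have hA3 : M ≤ listMaxI (l.map (cnt (l ++ [p]))) := by
          apply listMaxI_le _ _ (listMaxI_nonneg _)
          intro a ha
          rcases List.mem_map.mp ha with ⟨x, hx, rfl⟩
          have hle : cnt l x ≤ cnt (l ++ [p]) x := by
            simp [cnt, List.count_append]
          calc cnt l x ≤ cnt (l ++ [p]) x := hle
            _ ≤ _ := le_listMaxI _ _ (List.mem_map.mpr ⟨x, hx, rfl⟩)
        have hgoal : maxCount (l ++ [p]) = max M (c + 1) := by
          rw [maxCount, hmap, listMaxI_concat, hcount]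
          omega
        rw [hgoal, hcount]
      · -- new distinct element: run restarts at 1
        have htl : t ∉ l := by
          intro htl
          exact hpt (le_antisymm (hat p hpm) (pv_le_getLast l p hl hp t htl))
        have hstep : bStep (M, c, some p) t = (max M 1, 1, some t) := by
          simp [bStep, hpt]; omega
        rw [List.foldl_cons, List.foldl_nil, hstep]
        have hcount : cnt (l ++ [t]) t = 1 := by
          simp [cnt, List.count_append, List.count_eq_zero_of_not_mem htl]
        have hmapeq : l.map (cnt (l ++ [t])) = l.map (cnt l) := by
          apply List.map_congr_left
          intro x hx
          have hxt : x ≠ t := fun h => htl (h ▸ hx)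
          have h0 : [t].count x = 0 := List.count_eq_zero.mpr (by simp [hxt])
          simp [cnt, List.count_append, h0]
        have hgoal : maxCount (l ++ [t]) = max M 1 := by
          rw [maxCount, hmap, listMaxI_concat, hcount, hmapeq]; rfl
        rw [hgoal, hcount]

-- ---- main equivalence ----

theorem bestInvitation_eq (first second : List String)
    (h1 : first ≠ []) (h2 : second ≠ []) :
    bestInvitation first second = bestInvitation_alt first second := by
  unfold bestInvitation bestInvitation_alt
  set combined := (first.zip second).flatMap (fun p => [p.1, p.2]) with hcomb
  rw [pv_dict_eq]
  rw [show (combined.foldl (fun d x => d.modify x 0 (· + 1)) PySem.Dict.empty)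
        = PySem.Dict.counter combined from (PySem.Dict.counter_eq_foldl combined).symm]
  rw [show (fun (acc : List (String × Int)) (p : String × Int) => acc ++ [(p.1, p.2)])
        = (fun acc p => acc ++ [p]) from by funext acc p; simp]
  simp only [PySem.List.foldl_append_singleton_eq_self, List.nil_append]
  rw [PySem.Dict.items_counter]
  set S := PySem.Set.ofList combined with hS
  -- nonemptiness
  have hzip : first.zip second ≠ [] := by
    cases first with
    | nil => exact absurd rfl h1
    | cons a f => cases second with
      | nil => exact absurd rfl h2
      | cons b s => simp [List.zip]
  have hcne : combined ≠ [] := by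
    cases hz : first.zip second with
    | nil => exact absurd hz hzip
    | cons p t => simp [hcomb, hz]
  -- A's side: the head of the count-descending sort is the maximal count
  have hPne : PySem.List.sorted (S.map (fun k => (k, (combined.count k : Int)))) (fun x => x.2) true ≠ [] := by
    intro h
    rw [PySem.List.sorted_eq_nil_iff] at h
    have hSne : S ≠ [] := by
      cases hc : combined with
      | nil => exact absurd hc hcne
      | cons x t =>
        intro hnil
        have : x ∈ S := by rw [hS, hc]; exact (PySem.Set.mem_ofList _ _).mpr (by simp)
        rw [hnil] at this; exact absurd this (List.not_mem_nil)
    exact hSne (by simpa using h)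
  cases hP : PySem.List.sorted (S.map (fun k => (k, (combined.count k : Int)))) (fun x => x.2) true with
  | nil => exact absurd hP hPne
  | cons m tP =>
    simp only [PySem.List.pyGetD_zero_cons]
    have hmMem : m ∈ S.map (fun k => (k, (combined.count k : Int))) := by
      have : m ∈ PySem.List.sorted (S.map (fun k => (k, (combined.count k : Int)))) (fun x => x.2) true := by rw [hP]; simp
      exact (PySem.List.mem_sorted _ _ _ _).mp this
    have hmMax := PySem.List.key_head_sorted_rev_ge _ _ hP
    -- m.2 = maxCount combined
    have hm2 : m.2 = maxCount combined := by
      rcases List.mem_map.mp hmMem with ⟨k0, hk0, hkm⟩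
      have hk0c : k0 ∈ combined := (PySem.Set.mem_ofList _ _).mp (hS ▸ hk0)
      have hlow : m.2 ≤ maxCount combined := by
        rw [← hkm]
        exact le_listMaxI _ _ (List.mem_map.mpr ⟨k0, hk0c, rfl⟩)
      have hhigh : maxCount combined ≤ m.2 := by
        apply listMaxI_le
        · rw [← hkm]; simp
        · intro a ha
          rcases List.mem_map.mp ha with ⟨x, hx, rfl⟩
          have hxS : x ∈ S := by rw [hS]; exact (PySem.Set.mem_ofList _ _).mpr hx
          exact hmMax (x, (combined.count x : Int)) (List.mem_map.mpr ⟨x, hxS, rfl⟩)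
      omega
    -- B's side: the run scan on the sorted list is also maxCount combined
    set sc := PySem.List.sorted combined (fun x => x) false with hsc
    have hperm : sc.Perm combined := PySem.List.sorted_perm _ _ _
    have hscne : sc ≠ [] := by
      intro h
      rw [hsc, PySem.List.sorted_eq_nil_iff] at h
      exact hcne h
    have hpw : sc.Pairwise (· ≤ ·) := PySem.List.sorted_pairwise combined (fun x => x)
    obtain ⟨p, hp, hfold⟩ := scan_run sc hpw hscne
    rw [hfold]
    have hcnt : cnt sc = cnt combined := by
      funext x
      simp [cnt, hperm.count_eq]
    have : maxCount sc = maxCount combined := by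
      rw [maxCount, maxCount, hcnt]
      exact listMaxI_perm _ _ (hperm.map _)
    rw [this, ← hm2]

-- ===== VERDICT (by name: the statement is the Claim_ definition above) =====
theorem bestInvitation_spec : Claim_equal_bestInvitation := by
  intro first second _ hpre
  exact bestInvitation_eq first second hpre.1 hpre.2
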